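-- pv_equiv track=rewrite | github.com/VeloF2025/Archon | python/src/agents/pattern_recognition/pattern_detector.py | _detect_god_function
-- ===== SOURCE A (Python) =====
-- def _detect_god_function(code: str) -> bool:
--     """Detect overly complex functions"""
--     lines = code.split('\n')
--     in_function = False
--     function_lines = 0
--
--     for line in lines:
--         if 'def ' in line or 'function ' in line or 'const ' in line:
--             if in_function and function_lines > 100:
--                 return True
--             in_function = True
--             function_lines = 0
--         elif in_function:
--             function_lines += 1
--
--     return function_lines > 100
-- ===== SOURCE B (Python) =====
-- def _detect_god_function(code: str) -> bool:
--     """Detect overly complex functions (marker-index table + gap pass)."""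
--     lines = code.split('\n')
--     idxs = [i for i, line in enumerate(lines)
--             if 'def ' in line or 'function ' in line or 'const ' in line]
--     if not idxs:
--         return False
--     idxs.append(len(lines))
--     return any(b - a - 1 > 100 for a, b in zip(idxs, idxs[1:]))
-- ===== Notes on version B (the rewrite author's own statement) =====
-- stated objective: alternative
-- what changed: Replaces the in_function flag / running line-counter state machine with an explicit table of marker-line indices (built once via enumerate) plus a sentinel, deciding via pairwise index gaps > 101.
import Mathlib
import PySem

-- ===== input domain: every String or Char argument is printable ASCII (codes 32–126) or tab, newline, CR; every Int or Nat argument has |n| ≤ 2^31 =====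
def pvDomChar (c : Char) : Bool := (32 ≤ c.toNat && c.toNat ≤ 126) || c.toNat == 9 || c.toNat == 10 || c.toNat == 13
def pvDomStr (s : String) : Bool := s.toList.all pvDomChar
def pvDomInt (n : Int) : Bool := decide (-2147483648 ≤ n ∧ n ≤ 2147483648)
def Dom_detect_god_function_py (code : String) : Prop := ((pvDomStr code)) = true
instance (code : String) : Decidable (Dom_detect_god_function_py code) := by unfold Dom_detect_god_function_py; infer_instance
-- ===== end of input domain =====

-- B replaces A's in_function/counter state machine by a marker-index table plus a pairwise gap pass (objective: alternative, same cost).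

-- ===== PORT A =====
-- 'def ' in line or 'function ' in line or 'const ' in line
def markerA (line : String) : Bool :=
  PySem.Str.isIn "def " line || PySem.Str.isIn "function " line || PySem.Str.isIn "const " line

-- the for-loop with early return, state = (in_function, function_lines)
def loopA : List String → Bool → Int → Bool
  | [], _, cnt => decide (cnt > 100)
  | l :: ls, inf, cnt =>
    if markerA l then
      if inf && decide (cnt > 100) then true else loopA ls true 0
    else if inf then loopA ls inf (cnt + 1)
    else loopA ls inf cnt

def detect_god_function_py (code : String) : Bool :=
  loopA ((PySem.Str.split? code "\n").getD []) false 0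

-- ===== PORT B =====
def markerB (line : String) : Bool :=
  PySem.Str.isIn "def " line || PySem.Str.isIn "function " line || PySem.Str.isIn "const " line

def detect_god_function_py_alt (code : String) : Bool :=
  let lines := (PySem.Str.split? code "\n").getD []
  let idxs := ((PySem.List.enumerate lines 0).filter (fun p => markerB p.2)).map (fun p => p.1)
  if idxs = [] then false
  else
    let idxs2 := idxs ++ [(lines.length : Int)]
    (idxs2.zip idxs2.tail).any (fun p => decide (p.2 - p.1 - 1 > 100))

-- ===== PRECONDITION & SPEC =====
def Spec_detect_god_function_py (code : String) (out : Bool) : Prop := out = detect_god_function_py_alt code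
instance (code : String) (out : Bool) : Decidable (Spec_detect_god_function_py code out) := by unfold Spec_detect_god_function_py; infer_instance

-- ===== CLAIM (what is proved, stated in full; the proofs are below) =====
def Claim_equal_detect_god_function_py : Prop := ∀ (code : String), Dom_detect_god_function_py code → Spec_detect_god_function_py code (detect_god_function_py code)

-- ===== LEMMAS AND PROOFS =====

-- B's pairwise gap pass over consecutive elements, as a recursion
def pairAny : List Int → Bool
  | a :: b :: rest => decide (b - a - 1 > 100) || pairAny (b :: rest)
  | _ => false

-- marker indices of the lines, starting at base
def mk : Int → List String → List Int
  | _, [] => []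
  | base, l :: ls => if markerA l then base :: mk (base + 1) ls else mk (base + 1) ls

lemma zip_any_eq_pairAny (xs : List Int) :
    (xs.zip xs.tail).any (fun p => decide (p.2 - p.1 - 1 > 100)) = pairAny xs := by
  match xs with
  | [] => rfl
  | [a] => rfl
  | a :: b :: rest =>
    have ih := zip_any_eq_pairAny (b :: rest)
    simp only [List.tail_cons] at ih ⊢
    simp only [List.zip_cons_cons, List.any_cons, pairAny, ih]

lemma mk_eq_enum (ls : List String) : ∀ base : Int,
    ((PySem.List.enumerate ls base).filter (fun p => markerB p.2)).map (fun p => p.1)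
      = mk base ls := by
  induction ls with
  | nil => intro base; rfl
  | cons l ls ih =>
    intro base
    simp only [PySem.List.enumerate_cons, List.filter_cons, mk]
    have hm : markerB l = markerA l := rfl
    by_cases h : markerA l
    · simp [hm, h, ih]
    · simp [hm, h, ih]

lemma loopA_true (ls : List String) : ∀ base cnt : Int,
    loopA ls true cnt = pairAny ((base - cnt - 1) :: (mk base ls ++ [base + ls.length])) := by
  induction ls with
  | nil =>
    intro base cnt
    simp only [loopA, mk, List.nil_append, List.length_nil, Nat.cast_zero, add_zero, pairAny,
      Bool.or_false]
    have h : base - (base - cnt - 1) - 1 = cnt := by ring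
    rw [h]
  | cons l ls ih =>
    intro base cnt
    have hlen : base + ((l :: ls).length : Int) = (base + 1) + (ls.length : Int) := by
      push_cast [List.length_cons]; ring
    simp only [loopA]
    by_cases h : markerA l
    · simp only [h, if_true, mk, hlen]
      rw [ih (base + 1) 0]
      have h0 : (base + 1 - 0 - 1) = base := by ring
      have h1 : base - (base - cnt - 1) - 1 = cnt := by ring
      rw [h0, List.cons_append]
      simp only [pairAny, h1]
      by_cases hc : cnt > 100 <;> simp [hc]
    · have h2 : (base + 1 - (cnt + 1) - 1) = base - cnt - 1 := by ring
      simp only [h, mk, hlen, Bool.false_eq_true, if_false, Bool.true_and]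
      rw [ih (base + 1) (cnt + 1), h2]
      simp

lemma loopA_false (ls : List String) : ∀ base : Int,
    loopA ls false 0 = pairAny (mk base ls ++ [base + ls.length]) := by
  induction ls with
  | nil => intro base; simp [loopA, mk, pairAny]
  | cons l ls ih =>
    intro base
    have hlen : base + ((l :: ls).length : Int) = (base + 1) + (ls.length : Int) := by
      push_cast [List.length_cons]; ring
    simp only [loopA]
    by_cases h : markerA l
    · simp only [h, if_true, mk, hlen, Bool.false_and, Bool.false_eq_true, if_false]
      rw [loopA_true ls (base + 1) 0]
      have : (base + 1 - 0 - 1) = base := by ring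
      rw [this, List.cons_append]
    · simp only [h, mk, hlen, Bool.false_eq_true, if_false]
      exact ih (base + 1)

lemma pairAny_singleton (a : Int) : pairAny [a] = false := rfl

-- ===== VERDICT (by name: the statement is the Claim_ definition above) =====
theorem detect_god_function_py_spec : Claim_equal_detect_god_function_py := by
  intro code _
  unfold Spec_detect_god_function_py detect_god_function_py detect_god_function_py_alt
  set lines := (PySem.Str.split? code "\n").getD [] with hl
  simp only [mk_eq_enum, zip_any_eq_pairAny]
  rw [loopA_false lines 0]
  by_cases h : mk 0 lines = []
  · simp [h, pairAny_singleton]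
  · simp [h, zero_add]
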